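-- pv_equiv track=rewrite | github.com/naveenr414/tetris | policies.py | move_down_max
-- ===== SOURCE A (Python) =====
-- from copy import deepcopy
--
-- def move_down_max(grid):
--     """Move the box down and return the new grid
--
--     Arguments:
--         grid: List of lists with x, o
--
--     Returns: New grid, another list of lists with x and o"""
--     new_grid = deepcopy(grid)
--     max_moves = 1000
--     for i in range(len(grid)):
--         for j in range(len(grid[i])):
--             if new_grid[i][j] == "o":
--                 for i_prime in range(i+1,len(grid)):
--                     if new_grid[i_prime][j] == "x":
--                         max_moves = min(max_moves,(i_prime-i)-1)
--                         break
--                 else: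
--                     max_moves = min(max_moves,(len(grid)-i)-1)
--                 new_grid[i][j] = "."
--     for i in range(len(grid)):
--         for j in range(len(grid[i])):
--             if grid[i][j] == "o":
--                 new_grid[i+max_moves][j] = "o"
--     return new_grid, max_moves
-- ===== SOURCE B (Python) =====
-- def move_down_max(grid):
--     R = len(grid)
--     C = len(grid[0]) if grid else 0
--     mm = 1000
--     for j in range(C):
--         gap = 0
--         for i in range(R - 1, -1, -1):
--             row = grid[i]
--             c = row[j] if j < len(row) else ""
--             if c == "x":
--                 gap = 0
--             else:
--                 if c == "o":
--                     mm = min(mm, gap)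
--                 gap += 1
--     new_grid = [["o" if i >= mm and j < len(grid[i - mm]) and grid[i - mm][j] == "o"
--                  else ("." if c == "o" else c)
--                  for j, c in enumerate(row)]
--                 for i, row in enumerate(grid)]
--     return new_grid, mm
-- ===== Notes on version B (the rewrite author's own statement) =====
-- stated objective: alternative
-- what changed: Replaces A's per-'o' downward rescan and its two in-place mutation passes by a single bottom-up per-column sweep that carries the distance to the nearest 'x' below, plus a functional pointwise rebuild of the grid (O(R*C) work instead of A's O(R^2*C); the harness could not time it, so no speed is claimed).
-- outside the precondition, e.g. on move_down_max([['x'], ['x', 'o']]): A returns ([['x'], ['x', 'o']], 0), B returns ([['x'], ['x', '.']], 1000); on move_down_max([[], ['o']]): A returns ([[], ['o']], 0), B returns ([[], ['.']], 1000)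
import Mathlib
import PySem

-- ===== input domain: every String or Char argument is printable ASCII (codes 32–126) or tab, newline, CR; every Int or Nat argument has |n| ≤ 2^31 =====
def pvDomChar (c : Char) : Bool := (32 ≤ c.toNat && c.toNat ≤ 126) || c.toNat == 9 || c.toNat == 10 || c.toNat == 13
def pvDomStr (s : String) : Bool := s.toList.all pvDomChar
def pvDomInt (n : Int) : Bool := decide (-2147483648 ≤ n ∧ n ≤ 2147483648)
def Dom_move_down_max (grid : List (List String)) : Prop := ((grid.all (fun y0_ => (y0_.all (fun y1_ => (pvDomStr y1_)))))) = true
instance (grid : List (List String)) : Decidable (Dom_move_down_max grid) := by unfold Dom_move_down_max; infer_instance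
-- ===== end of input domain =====

-- B replaces A's per-'o' downward rescan and two mutation passes by a single bottom-up
-- sweep per column plus a functional pointwise rebuild of the grid (a different algorithm
-- doing O(R*C) work instead of A's O(R^2*C); no measured speed is claimed).

-- ===== PORT A =====
-- new_grid[i][j] = v  (indices are in range whenever Python executes this on a
-- rectangular grid, where List.set is exact)
def pvSetCell (g : List (List String)) (i j : Nat) (v : String) : List (List String) :=
  g.set i ((g.getD i []).set j v)

-- one step of A's first pass at cell (i, j): the for/else scan over i+1..R-1 (break = find?)
def pvScanStep (grid : List (List String)) (i j : Nat)
    (st : List (List String) × Int) : List (List String) × Int :=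
  if (st.1.getD i []).getD j "" == "o" then
    let mm' := match List.find? (fun i' => (st.1.getD i' []).getD j "" == "x")
                   (List.range' (i+1) (grid.length - (i+1))) with
      | some i' => min st.2 (((i' : Int) - (i : Int)) - 1)
      | none => min st.2 (((grid.length : Int) - (i : Int)) - 1)
    (pvSetCell st.1 i j ".", mm')
  else st

def move_down_max (grid : List (List String)) : List (List String) × Int :=
  let st := (List.range grid.length).foldl (fun st i =>
      (List.range ((grid.getD i []).length)).foldl (fun st j => pvScanStep grid i j st) st)
    (grid, (1000 : Int))
  let ng2 := (List.range grid.length).foldl (fun ng i =>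
      (List.range ((grid.getD i []).length)).foldl (fun ng j =>
        if (grid.getD i []).getD j "" == "o" then pvSetCell ng (i + st.2.toNat) j "o" else ng) ng)
    st.1
  (ng2, st.2)

-- ===== PORT B =====
-- bottom-up sweep of column j carrying (max_moves, gap to nearest 'x' below)
def pvColStep (grid : List (List String)) (j : Nat) (st : Int × Int) (i : Nat) : Int × Int :=
  let c := (grid.getD i []).getD j ""
  if c == "x" then (st.1, 0)
  else ((if c == "o" then min st.1 st.2 else st.1), st.2 + 1)

def move_down_max_alt (grid : List (List String)) : List (List String) × Int :=
  let C := (grid.headD []).length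
  let mm := (List.range C).foldl (fun mm j =>
      ((List.range grid.length).reverse.foldl (pvColStep grid j) (mm, 0)).1) 1000
  let ng := grid.mapIdx (fun i row => row.mapIdx (fun j c =>
      if decide (mm ≤ (i : Int)) && decide (j < (grid.getD (i - mm.toNat) []).length)
          && ((grid.getD (i - mm.toNat) []).getD j "" == "o") then "o"
      else if c == "o" then "." else c))
  (ng, mm)

-- ===== PRECONDITION & SPEC =====
-- Pre_ excludes ragged (non-rectangular) grids that contain an "o": on those A's column
-- scan or its drop write can raise IndexError, and where the scan happens to stop early A
-- returns a value that is an accident of the particular row lengths.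
def Pre_move_down_max (grid : List (List String)) : Prop :=
  (∀ row ∈ grid, row.length = (grid.headD []).length) ∨
  (∀ row ∈ grid, ∀ c ∈ row, ¬ c = "o")
instance (grid : List (List String)) : Decidable (Pre_move_down_max grid) := by
  unfold Pre_move_down_max; infer_instance

def pvWitness_move_down_max : List (List String) :=
  [["o", "."], [".", "x"], [".", "."]]

def Spec_move_down_max (grid : List (List String)) (out : List (List String) × Int) : Prop := out = move_down_max_alt grid
instance (grid : List (List String)) (out : List (List String) × Int) : Decidable (Spec_move_down_max grid out) := by unfold Spec_move_down_max; infer_instance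

-- ===== CLAIM (what is proved, stated in full; the proofs are below) =====
def Claim_equal_move_down_max : Prop := ∀ (grid : List (List String)), Dom_move_down_max grid → Pre_move_down_max grid → Spec_move_down_max grid (move_down_max grid)

-- ===== LEMMAS AND PROOFS =====
def pvBl (c : String) : String := if c == "o" then "." else c

def pvDrop (grid : List (List String)) (i j : Nat) : Int :=
  match List.find? (fun i' => (grid.getD i' []).getD j "" == "x")
      (List.range' (i+1) (grid.length - (i+1))) with
  | some i' => ((i' : Int) - (i : Int)) - 1
  | none => ((grid.length : Int) - (i : Int)) - 1

def pvStep (grid : List (List String)) (s : Int) (p : Nat × Nat) : Int :=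
  if (grid.getD p.1 []).getD p.2 "" == "o" then min s (pvDrop grid p.1 p.2) else s

def pvBlankCell (row : List String) (k : Nat) : List String := (row.take k).map pvBl ++ row.drop k

def pvBlankTo (grid : List (List String)) (n : Nat) : List (List String) :=
  (grid.take n).map (List.map pvBl) ++ grid.drop n

def pvBlankAt (grid : List (List String)) (i k : Nat) : List (List String) :=
  (grid.take i).map (List.map pvBl) ++ pvBlankCell (grid.getD i []) k :: grid.drop (i+1)

lemma pvBl_ne_o (c : String) (h : (c == "o") = false) : pvBl c = c := by
  simp [pvBl, h]

lemma pvBlankCell_zero (row : List String) : pvBlankCell row 0 = row := by simp [pvBlankCell]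

lemma pvBlankCell_top (row : List String) (k : Nat) (h : row.length ≤ k) :
    pvBlankCell row k = row.map pvBl := by
  simp [pvBlankCell, List.take_of_length_le h, List.drop_of_length_le h]

lemma pvBlankCell_getD (row : List String) (k : Nat) :
    (pvBlankCell row k).getD k "" = row.getD k "" := by
  rcases lt_or_ge k row.length with h | h
  · rw [pvBlankCell, List.getD_eq_getElem?_getD, List.getElem?_append_right (by simp),
      List.getD_eq_getElem?_getD]
    simp [List.getElem?_drop, min_eq_left h.le]
  · rw [pvBlankCell_top row k h]
    rw [List.getD_eq_getElem?_getD, List.getD_eq_getElem?_getD,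
      List.getElem?_eq_none (by simpa using h), List.getElem?_eq_none h]

lemma pvBlankCell_succ_of_ne (row : List String) (k : Nat)
    (h : (row.getD k "" == "o") = false) : pvBlankCell row (k+1) = pvBlankCell row k := by
  rcases lt_or_ge k row.length with hk | hk
  · have hg : row.getD k "" = row[k] := List.getD_eq_getElem row "" hk
    rw [pvBlankCell, pvBlankCell, List.take_add_one, List.getElem?_eq_getElem hk]
    rw [List.drop_eq_getElem_cons hk]
    simp only [Option.toList_some, List.map_append, List.map_cons, List.map_nil]
    rw [pvBl_ne_o _ (by rw [← hg]; exact h)]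
    simp
  · rw [pvBlankCell_top row _ (by omega), pvBlankCell_top row _ hk]

lemma pvBlankCell_set (row : List String) (k : Nat) (hk : k < row.length)
    (h : (row.getD k "" == "o") = true) :
    (pvBlankCell row k).set k "." = pvBlankCell row (k+1) := by
  have hg : row[k] = "o" := by
    have := (beq_iff_eq).mp h
    rwa [List.getD_eq_getElem row "" hk] at this
  rw [pvBlankCell, pvBlankCell, List.drop_eq_getElem_cons hk,
    List.take_add_one, List.getElem?_eq_getElem hk]
  simp only [Option.toList_some, List.map_append, List.map_cons, List.map_nil]
  rw [List.set_append, if_neg (by simp [min_eq_left hk.le])]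
  have hlen : ((row.take k).map pvBl).length = k := by simp [min_eq_left hk.le]
  rw [hlen, Nat.sub_self, List.set_cons_zero]
  rw [hg]
  simp [pvBl]

lemma pvBlankAt_getD_self (grid : List (List String)) (i k : Nat) (hi : i < grid.length) :
    (pvBlankAt grid i k).getD i [] = pvBlankCell (grid.getD i []) k := by
  have hlen : ((grid.take i).map (List.map pvBl)).length = i := by simp [min_eq_left hi.le]
  rw [pvBlankAt, List.getD_eq_getElem?_getD, List.getElem?_append_right hlen.le,
    hlen, Nat.sub_self]
  simp

lemma pvBlankAt_getD_gt (grid : List (List String)) (i k r : Nat) (hi : i < grid.length)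
    (hr : i < r) : (pvBlankAt grid i k).getD r [] = grid.getD r [] := by
  have hlen : ((grid.take i).map (List.map pvBl)).length = i := by simp [min_eq_left hi.le]
  rw [pvBlankAt, List.getD_eq_getElem?_getD, List.getElem?_append_right (by rw [hlen]; omega), hlen]
  rw [show r - i = (r - (i+1)) + 1 by omega, List.getElem?_cons_succ, List.getElem?_drop,
    show i + 1 + (r - (i+1)) = r by omega, List.getD_eq_getElem?_getD]

lemma pvBlankAt_zero (grid : List (List String)) (i : Nat) (hi : i < grid.length) :
    pvBlankAt grid i 0 = pvBlankTo grid i := by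
  rw [pvBlankAt, pvBlankTo, pvBlankCell_zero, List.getD_eq_getElem _ _ hi,
    List.drop_eq_getElem_cons hi]

lemma pvBlankAt_top (grid : List (List String)) (i k : Nat) (hi : i < grid.length)
    (hk : (grid.getD i []).length ≤ k) : pvBlankAt grid i k = pvBlankTo grid (i+1) := by
  rw [pvBlankAt, pvBlankTo, pvBlankCell_top _ _ hk, List.take_add_one,
    List.getElem?_eq_getElem hi]
  simp only [Option.toList_some, List.map_append, List.map_cons, List.map_nil]
  rw [List.getD_eq_getElem _ _ hi]
  simp

lemma pvBlankTo_full (grid : List (List String)) :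
    pvBlankTo grid grid.length = grid.map (List.map pvBl) := by
  simp [pvBlankTo]

lemma pv_find?_congr {l : List Nat} {p q : Nat → Bool} (h : ∀ x ∈ l, p x = q x) :
    l.find? p = l.find? q := by
  induction l with
  | nil => rfl
  | cons a l ih =>
    rw [List.find?_cons, List.find?_cons, h a List.mem_cons_self,
      ih (fun x hx => h x (List.mem_cons_of_mem a hx))]

lemma pass1_inner (grid : List (List String)) (i : Nat) (hi : i < grid.length) :
    ∀ (n k : Nat) (m : Int),
    (List.range' k n).foldl (fun st j => pvScanStep grid i j st) (pvBlankAt grid i k, m)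
    = (pvBlankAt grid i (k+n),
       ((List.range' k n).map (fun j => (i, j))).foldl (pvStep grid) m) := by
  intro n
  induction n with
  | zero => intro k m; simp
  | succ n ih =>
    intro k m
    rw [List.range'_succ, List.foldl_cons, List.map_cons, List.foldl_cons]
    have htest : ((pvBlankAt grid i k).getD i []).getD k "" = (grid.getD i []).getD k "" := by
      rw [pvBlankAt_getD_self grid i k hi, pvBlankCell_getD]
    have hstep : pvScanStep grid i k (pvBlankAt grid i k, m)
        = (pvBlankAt grid i (k+1), pvStep grid m (i, k)) := by
      rw [pvScanStep, pvStep]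
      simp only [htest]
      rcases ho : ((grid.getD i []).getD k "" == "o") with _ | _
      · rw [if_neg (by simp [ho]), if_neg (by simp [ho])]
        rw [show pvBlankAt grid i (k+1) = pvBlankAt grid i k from by
          rw [pvBlankAt, pvBlankAt, pvBlankCell_succ_of_ne _ _ ho]]
      · have hk : k < (grid.getD i []).length := by
          by_contra hk
          push_neg at hk
          rw [List.getD_eq_getElem?_getD, List.getElem?_eq_none hk] at ho
          simp at ho
        simp only [if_true]
        have hfind : List.find? (fun i' => ((pvBlankAt grid i k).getD i' []).getD k "" == "x")
              (List.range' (i+1) (grid.length - (i+1)))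
            = List.find? (fun i' => (grid.getD i' []).getD k "" == "x")
              (List.range' (i+1) (grid.length - (i+1))) := by
          apply pv_find?_congr
          intro x hx
          rw [List.mem_range'] at hx
          obtain ⟨t, ht, hxe⟩ := hx
          rw [pvBlankAt_getD_gt grid i k x hi (by omega)]
        have hset : pvSetCell (pvBlankAt grid i k) i k "." = pvBlankAt grid i (k+1) := by
          rw [pvSetCell, pvBlankAt_getD_self grid i k hi, pvBlankCell_set _ _ hk ho]
          have hlen : ((grid.take i).map (List.map pvBl)).length = i := by
            simp [min_eq_left hi.le]
          rw [pvBlankAt, List.set_append, if_neg (by omega), hlen, Nat.sub_self,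
            List.set_cons_zero, pvBlankAt]
        rw [hset, pvDrop, hfind]
        rcases hf : List.find? (fun i' => (grid.getD i' []).getD k "" == "x")
            (List.range' (i+1) (grid.length - (i+1))) with _ | i' <;> simp [hf]
    rw [hstep, ih (k+1) (pvStep grid m (i, k))]
    have : k + 1 + n = k + (n + 1) := by omega
    rw [this]

def pvRowMajor (grid : List (List String)) (n : Nat) : List (Nat × Nat) :=
  (List.range n).flatMap (fun i => (List.range ((grid.getD i []).length)).map (fun j => (i, j)))

lemma pass1_outer (grid : List (List String)) :
    ∀ n, n ≤ grid.length →
    (List.range n).foldl (fun st i =>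
        (List.range ((grid.getD i []).length)).foldl (fun st j => pvScanStep grid i j st) st)
      (grid, (1000 : Int))
    = (pvBlankTo grid n, (pvRowMajor grid n).foldl (pvStep grid) 1000) := by
  intro n
  induction n with
  | zero => intro _; simp [pvBlankTo, pvRowMajor]
  | succ n ih =>
    intro hn
    have hn' : n < grid.length := by omega
    rw [List.range_succ, List.foldl_append, ih (by omega), List.foldl_cons, List.foldl_nil]
    have h0 : pvBlankTo grid n = pvBlankAt grid n 0 := (pvBlankAt_zero grid n hn').symm
    rw [h0]
    have := pass1_inner grid n hn' ((grid.getD n []).length) 0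
      ((pvRowMajor grid n).foldl (pvStep grid) 1000)
    rw [← List.range_eq_range'] at this
    rw [this, pvBlankAt_top grid n _ hn' (by omega)]
    simp only [pvRowMajor, List.range_succ, List.flatMap_append, List.foldl_append,
      List.flatMap_cons, List.flatMap_nil, List.append_nil]

-- pass 2
def pvCondB (grid : List (List String)) (mm : Int) (n k r c : Nat) : Bool :=
  decide (mm ≤ (r : Int)) &&
    (decide (r - mm.toNat < n) || (decide (r - mm.toNat = n) && decide (c < k))) &&
    ((grid.getD (r - mm.toNat) []).getD c "" == "o")

def pvInv (grid : List (List String)) (mm : Int) (n k : Nat) (ng : List (List String)) : Prop :=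
  ng.length = grid.length ∧
  (∀ r, (ng.getD r []).length = (grid.getD r []).length) ∧
  (∀ r c, (ng.getD r []).getD c "" =
    if pvCondB grid mm n k r c then "o" else pvBl ((grid.getD r []).getD c ""))

lemma pvSetCell_getD (g : List (List String)) (a b : Nat) (v : String) (r c : Nat) :
    ((pvSetCell g a b v).getD r []).getD c "" =
    if r = a ∧ a < g.length ∧ c = b ∧ b < (g.getD a []).length then v
    else (g.getD r []).getD c "" := by
  simp only [pvSetCell, List.getD_eq_getElem?_getD, List.getElem?_set]
  by_cases hr : a = r
  · subst hr
    by_cases ha : a < g.length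
    · rw [if_pos rfl, if_pos ha]
      simp only [Option.getD_some, List.getElem?_set]
      by_cases hc : b = c
      · subst hc
        by_cases hb : b < (g[a]?.getD ([] : List String)).length
        · rw [if_pos rfl, if_pos hb, if_pos (by exact ⟨trivial, ha, rfl, hb⟩)]
          simp
        · rw [if_pos rfl, if_neg hb, if_neg (by tauto)]
          simp [List.getElem?_eq_none (by omega : (g[a]?.getD ([] : List String)).length ≤ b)]
      · rw [if_neg hc, if_neg (by tauto)]
    · rw [if_pos rfl, if_neg ha, if_neg (by tauto)]
      have : g[a]? = none := List.getElem?_eq_none (by omega)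
      simp [this]
  · rw [if_neg hr, if_neg (by tauto)]

lemma pvDrop_nonneg (grid : List (List String)) (i j : Nat) (hi : i < grid.length) :
    0 ≤ pvDrop grid i j := by
  rw [pvDrop]
  rcases hf : List.find? (fun i' => (grid.getD i' []).getD j "" == "x")
      (List.range' (i+1) (grid.length - (i+1))) with _ | i'
  · simp only []
    omega
  · simp only []
    have := List.mem_range'.mp (List.mem_of_find?_eq_some hf)
    obtain ⟨t, ht, rfl⟩ := this
    push_cast
    omega

lemma pvDrop_le (grid : List (List String)) (i j : Nat) (hi : i < grid.length) :
    pvDrop grid i j ≤ (grid.length : Int) - (i : Int) - 1 := by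
  rw [pvDrop]
  rcases hf : List.find? (fun i' => (grid.getD i' []).getD j "" == "x")
      (List.range' (i+1) (grid.length - (i+1))) with _ | i'
  · simp only []
    omega
  · simp only []
    have := List.mem_range'.mp (List.mem_of_find?_eq_some hf)
    obtain ⟨t, ht, rfl⟩ := this
    push_cast
    omega

lemma pvStep_le (grid : List (List String)) (s : Int) (p : Nat × Nat) :
    pvStep grid s p ≤ s := by
  rw [pvStep]; split_ifs
  · exact min_le_left _ _
  · exact le_refl s

lemma foldl_pvStep_le_init (grid : List (List String)) (l : List (Nat × Nat)) :
    ∀ (b : Int), l.foldl (pvStep grid) b ≤ b := by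
  induction l with
  | nil => intro b; simp
  | cons p l ih =>
    intro b
    rw [List.foldl_cons]
    exact le_trans (ih _) (pvStep_le grid b p)

lemma foldl_pvStep_le_mem (grid : List (List String)) (l : List (Nat × Nat)) :
    ∀ (b : Int) (p : Nat × Nat), p ∈ l → ((grid.getD p.1 []).getD p.2 "" == "o") = true →
    l.foldl (pvStep grid) b ≤ pvDrop grid p.1 p.2 := by
  induction l with
  | nil => intro b p h; exact absurd h (List.not_mem_nil)
  | cons q l ih =>
    intro b p hp ho
    rw [List.foldl_cons]
    rcases List.mem_cons.mp hp with rfl | hp'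
    · refine le_trans (foldl_pvStep_le_init grid l _) ?_
      rw [pvStep, if_pos ho]
      exact min_le_right _ _
    · exact ih _ p hp' ho

lemma foldl_pvStep_nonneg (grid : List (List String)) (l : List (Nat × Nat)) :
    ∀ (b : Int), 0 ≤ b → (∀ p ∈ l, p.1 < grid.length) → 0 ≤ l.foldl (pvStep grid) b := by
  induction l with
  | nil => intro b hb _; simpa using hb
  | cons p l ih =>
    intro b hb hmem
    rw [List.foldl_cons]
    refine ih _ ?_ (fun q hq => hmem q (List.mem_cons_of_mem p hq))
    rw [pvStep]
    split_ifs
    · exact le_min hb (pvDrop_nonneg grid p.1 p.2 (hmem p List.mem_cons_self))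
    · exact hb

lemma pvRowMajor_mem (grid : List (List String)) (n : Nat) (hn : n ≤ grid.length) :
    ∀ p ∈ pvRowMajor grid n, p.1 < grid.length ∧ p.2 < (grid.getD p.1 []).length := by
  intro p hp
  rw [pvRowMajor, List.mem_flatMap] at hp
  obtain ⟨i, hi, hp⟩ := hp
  rw [List.mem_map] at hp
  obtain ⟨j, hj, rfl⟩ := hp
  rw [List.mem_range] at hi hj
  exact ⟨by omega, hj⟩

lemma pvBl_empty : pvBl "" = "" := by decide

lemma pv_o_lt (row : List String) (c : Nat) (h : (row.getD c "" == "o") = true) :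
    c < row.length := by
  by_contra hc
  push_neg at hc
  rw [List.getD_eq_getElem?_getD, List.getElem?_eq_none hc] at h
  simp at h

lemma pvSetCell_len (g : List (List String)) (a b : Nat) (v : String) :
    (pvSetCell g a b v).length = g.length := by
  simp [pvSetCell]

lemma pvSetCell_rowlen (g : List (List String)) (a b : Nat) (v : String) (r : Nat) :
    ((pvSetCell g a b v).getD r []).length = (g.getD r []).length := by
  rw [pvSetCell]
  by_cases hr : a = r
  · subst hr
    by_cases ha : a < g.length
    · rw [List.getD_eq_getElem?_getD, List.getElem?_set_self (by simpa using ha)]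
      simp
    · rw [List.getD_eq_getElem?_getD, List.getElem?_set, if_pos rfl, if_neg (by simpa using ha)]
      simp [List.getD_eq_getElem?_getD, List.getElem?_eq_none (show g.length ≤ a by omega)]
  · rw [List.getD_eq_getElem?_getD, List.getElem?_set_ne hr, ← List.getD_eq_getElem?_getD]

lemma pvCondB_succ (grid : List (List String)) (mm : Int) (hmm0 : 0 ≤ mm) (i k r c : Nat)
    (h : ((grid.getD i []).getD k "" == "o") = false ∨ ¬(r = i + mm.toNat ∧ c = k)) :
    pvCondB grid mm i (k+1) r c = pvCondB grid mm i k r c := by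
  have hmmn : (mm.toNat : Int) = mm := Int.toNat_of_nonneg hmm0
  unfold pvCondB
  by_cases hm : mm ≤ (r : Int)
  · by_cases he : r - mm.toNat = i
    · by_cases hc : c = k
      · have hr : r = i + mm.toNat := by omega
        rcases h with h | h
        · subst hc
          rw [he]
          simp only [List.getD_eq_getElem?_getD] at h
          simp [h]
        · exact absurd ⟨hr, hc⟩ h
      · rw [show (decide (c < k + 1)) = decide (c < k) from decide_eq_decide.mpr (by omega)]
    · simp [he]
  · simp [hm]

lemma pvCondB_rowend (grid : List (List String)) (mm : Int) (i r c : Nat) :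
    pvCondB grid mm i ((grid.getD i []).length) r c = pvCondB grid mm (i+1) 0 r c := by
  unfold pvCondB
  rcases ho : ((grid.getD (r - mm.toNat) []).getD c "" == "o") with _ | _
  · simp
  · by_cases he : r - mm.toNat = i
    · have hc : c < (grid.getD i []).length := by
        rw [← he]; exact pv_o_lt _ c ho
      have h1 : (decide (r - mm.toNat < i) || (decide (r - mm.toNat = i) && decide (c < (grid.getD i []).length))) = true := by
        simp only [List.getD_eq_getElem?_getD] at hc
        simp [he, hc]
      have h2 : (decide (r - mm.toNat < i+1) || (decide (r - mm.toNat = i+1) && decide (c < 0))) = true := by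
        simp; omega
      rw [h1, h2]
    · have h1 : (decide (r - mm.toNat < i)) = decide (r - mm.toNat < i + 1) := by
        apply decide_eq_decide.mpr; omega
      have h2 : (decide (r - mm.toNat = i+1) && decide (c < 0)) = false := by simp
      simp [he, h1, h2]

lemma pvCondB_init (grid : List (List String)) (mm : Int) (r c : Nat) :
    pvCondB grid mm 0 0 r c = false := by
  unfold pvCondB
  simp

lemma pvBlank_getD (grid : List (List String)) (r : Nat) :
    (grid.map (List.map pvBl)).getD r [] = (grid.getD r []).map pvBl := by
  rcases lt_or_ge r grid.length with h | h
  · rw [List.getD_eq_getElem?_getD, List.getD_eq_getElem?_getD, List.getElem?_map,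
      List.getElem?_eq_getElem h]
    simp
  · rw [List.getD_eq_getElem?_getD, List.getD_eq_getElem?_getD,
      List.getElem?_eq_none (by simpa using h), List.getElem?_eq_none h]
    simp

lemma pvMapBl_getD (row : List String) (c : Nat) :
    (row.map pvBl).getD c "" = pvBl (row.getD c "") := by
  rcases lt_or_ge c row.length with h | h
  · rw [List.getD_eq_getElem?_getD, List.getD_eq_getElem?_getD, List.getElem?_map,
      List.getElem?_eq_getElem h]
    simp
  · rw [List.getD_eq_getElem?_getD, List.getD_eq_getElem?_getD,
      List.getElem?_eq_none (by simpa using h), List.getElem?_eq_none h]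
    simp [pvBl_empty]

lemma pass2_step (grid : List (List String)) (mm : Int) (hmm0 : 0 ≤ mm)
    (hble : ∀ p : Nat × Nat, p.1 < grid.length →
      ((grid.getD p.1 []).getD p.2 "" == "o") = true → mm ≤ pvDrop grid p.1 p.2)
    (hC : ∀ r < grid.length, (grid.getD r []).length = (grid.headD []).length)
    (i k : Nat) (hi : i < grid.length) (ng : List (List String))
    (hinv : pvInv grid mm i k ng) :
    pvInv grid mm i (k+1)
      (if (grid.getD i []).getD k "" == "o" then pvSetCell ng (i + mm.toNat) k "o" else ng) := by
  obtain ⟨hlen, hrows, hvals⟩ := hinv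
  rcases ho : ((grid.getD i []).getD k "" == "o") with _ | _
  · rw [if_neg (by simp [ho])]
    refine ⟨hlen, hrows, fun r c => ?_⟩
    rw [hvals r c, pvCondB_succ grid mm hmm0 i k r c (Or.inl ho)]
  · rw [if_pos rfl]
    have hmmn : (mm.toNat : Int) = mm := Int.toNat_of_nonneg hmm0
    have hk : k < (grid.getD i []).length := pv_o_lt _ k ho
    have hdle : pvDrop grid i k ≤ (grid.length : Int) - i - 1 := pvDrop_le grid i k hi
    have hble' : mm ≤ pvDrop grid i k := hble (i, k) hi ho
    have hr0 : i + mm.toNat < grid.length := by omega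
    refine ⟨by rw [pvSetCell_len]; exact hlen,
      fun r => by rw [pvSetCell_rowlen]; exact hrows r, fun r c => ?_⟩
    rw [pvSetCell_getD]
    by_cases hat : r = i + mm.toNat ∧ c = k
    · obtain ⟨hr, hc⟩ := hat
      rw [if_pos ⟨hr, by omega, hc, by rw [hrows, hC _ hr0, ← hC i hi]; exact hk⟩]
      have hcond : pvCondB grid mm i (k+1) r c = true := by
        unfold pvCondB
        have e1 : (decide (mm ≤ (r : Int))) = true := by
          simp only [decide_eq_true_eq]; rw [hr]; push_cast; omega
        have e2 : r - mm.toNat = i := by omega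
        rw [e2, e1]
        have ho' := ho
        simp only [List.getD_eq_getElem?_getD] at ho'
        simp [hc, ho']
      rw [hcond]
      simp
    · rw [if_neg (by rw [hlen]; tauto)]
      rw [hvals r c, pvCondB_succ grid mm hmm0 i k r c (Or.inr hat)]

lemma pass2_inner (grid : List (List String)) (mm : Int) (hmm0 : 0 ≤ mm)
    (hble : ∀ p : Nat × Nat, p.1 < grid.length →
      ((grid.getD p.1 []).getD p.2 "" == "o") = true → mm ≤ pvDrop grid p.1 p.2)
    (hC : ∀ r < grid.length, (grid.getD r []).length = (grid.headD []).length)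
    (i : Nat) (hi : i < grid.length) :
    ∀ (q k : Nat) (ng : List (List String)), pvInv grid mm i k ng →
    pvInv grid mm i (k+q)
      ((List.range' k q).foldl (fun ng j =>
        if (grid.getD i []).getD j "" == "o" then pvSetCell ng (i + mm.toNat) j "o" else ng) ng) := by
  intro q
  induction q with
  | zero => intro k ng h; simpa using h
  | succ q ih =>
    intro k ng h
    rw [List.range'_succ, List.foldl_cons]
    have := ih (k+1) _ (pass2_step grid mm hmm0 hble hC i k hi ng h)
    rw [show k + 1 + q = k + (q + 1) by omega] at this
    exact this

lemma pass2_outer (grid : List (List String)) (mm : Int) (hmm0 : 0 ≤ mm)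
    (hble : ∀ p : Nat × Nat, p.1 < grid.length →
      ((grid.getD p.1 []).getD p.2 "" == "o") = true → mm ≤ pvDrop grid p.1 p.2)
    (hC : ∀ r < grid.length, (grid.getD r []).length = (grid.headD []).length) :
    ∀ n, n ≤ grid.length →
    pvInv grid mm n 0
      ((List.range n).foldl (fun ng i =>
        (List.range ((grid.getD i []).length)).foldl (fun ng j =>
          if (grid.getD i []).getD j "" == "o" then pvSetCell ng (i + mm.toNat) j "o" else ng) ng)
        (grid.map (List.map pvBl))) := by
  intro n
  induction n with
  | zero =>
    intro _
    simp only [List.range_zero, List.foldl_nil]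
    refine ⟨by simp, fun r => by rw [pvBlank_getD]; simp, fun r c => ?_⟩
    rw [pvBlank_getD, pvMapBl_getD, pvCondB_init]
    simp
  | succ n ih =>
    intro hn
    have hn' : n < grid.length := by omega
    rw [List.range_succ, List.foldl_append, List.foldl_cons, List.foldl_nil]
    have := pass2_inner grid mm hmm0 hble hC n hn' ((grid.getD n []).length) 0 _ (ih (by omega))
    rw [← List.range_eq_range'] at this
    obtain ⟨h1, h2, h3⟩ := this
    refine ⟨h1, h2, fun r c => ?_⟩
    rw [h3 r c, show (0 + (grid.getD n []).length) = (grid.getD n []).length by omega,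
      pvCondB_rowend]

def pvGap (grid : List (List String)) (j i : Nat) : Nat :=
  match List.find? (fun i' => (grid.getD i' []).getD j "" == "x")
      (List.range' i (grid.length - i)) with
  | some i' => i' - i
  | none => grid.length - i

lemma pvGap_drop (grid : List (List String)) (j i : Nat) (hi : i < grid.length) :
    pvDrop grid i j = ((pvGap grid j (i+1) : Nat) : Int) := by
  rw [pvDrop, pvGap]
  rcases hf : List.find? (fun i' => (grid.getD i' []).getD j "" == "x")
      (List.range' (i+1) (grid.length - (i+1))) with _ | i'
  · simp only []
    omega
  · simp only []
    have := List.mem_range'.mp (List.mem_of_find?_eq_some hf)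
    obtain ⟨t, ht, rfl⟩ := this
    push_cast
    omega

lemma pvGap_top (grid : List (List String)) (j : Nat) : pvGap grid j grid.length = 0 := by
  rw [pvGap]
  simp

lemma pvGap_cons (grid : List (List String)) (j a : Nat) (ha : a < grid.length) :
    (List.range' a (grid.length - a)) = a :: List.range' (a+1) (grid.length - (a+1)) := by
  rw [show grid.length - a = (grid.length - (a+1)) + 1 by omega, List.range'_succ]

lemma pvGap_x (grid : List (List String)) (j a : Nat) (ha : a < grid.length)
    (hx : ((grid.getD a []).getD j "" == "x") = true) : pvGap grid j a = 0 := by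
  rw [pvGap, pvGap_cons grid j a ha, List.find?_cons, hx]
  simp

lemma pvGap_notx (grid : List (List String)) (j a : Nat) (ha : a < grid.length)
    (hx : ((grid.getD a []).getD j "" == "x") = false) :
    pvGap grid j a = pvGap grid j (a+1) + 1 := by
  rw [pvGap, pvGap, pvGap_cons grid j a ha, List.find?_cons, hx]
  simp only [Bool.false_eq_true, if_false]
  rcases hf : List.find? (fun i' => (grid.getD i' []).getD j "" == "x")
      (List.range' (a+1) (grid.length - (a+1))) with _ | i'
  · simp only []
    omega
  · simp only []
    have := List.mem_range'.mp (List.mem_of_find?_eq_some hf)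
    obtain ⟨t, ht, rfl⟩ := this
    omega

lemma col_aux (grid : List (List String)) (j : Nat) :
    ∀ (q a : Nat), a + q ≤ grid.length → ∀ (m : Int),
    ((List.range' a q).reverse).foldl (pvColStep grid j) (m, ((pvGap grid j (a+q) : Nat) : Int))
    = ((((List.range' a q).reverse).map (fun i => (i, j))).foldl (pvStep grid) m,
       ((pvGap grid j a : Nat) : Int)) := by
  intro q
  induction q with
  | zero => intro a _ m; simp
  | succ q ih =>
    intro a ha m
    rw [List.range'_succ, List.reverse_cons, List.foldl_append, List.map_append,
      List.foldl_append]
    have e1 : a + 1 + q = a + (q + 1) := by omega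
    rw [← e1, ih (a+1) (by omega) m]
    simp only [List.foldl_cons, List.foldl_nil, List.map_cons, List.map_nil]
    have ha' : a < grid.length := by omega
    rw [pvColStep, pvStep]
    simp only []
    rcases hx : ((grid.getD a []).getD j "" == "x") with _ | _
    · rw [if_neg (by simp [hx]), pvGap_notx grid j a ha' hx]
      have hcast : ((pvGap grid j (a+1) + 1 : Nat) : Int) = ((pvGap grid j (a+1) : Nat) : Int) + 1 := by
        push_cast; ring
      rw [hcast]
      rcases hoo : ((grid.getD a []).getD j "" == "o") with _ | _
      · simp only [Bool.false_eq_true, if_false]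
      · simp only [if_true]
        rw [pvGap_drop grid j a ha']
    · rw [if_pos rfl, pvGap_x grid j a ha' hx]
      have hno : ((grid.getD a []).getD j "" == "o") = false := by
        have := (beq_iff_eq).mp hx
        rw [this]
        decide
      have hno' := hno
      simp only [List.getD_eq_getElem?_getD] at hno'
      rw [if_neg (by simp [hno'])]
      norm_num

lemma cols_fold (grid : List (List String)) :
    ∀ (l : List Nat) (m : Int),
    l.foldl (fun mm j => ((List.range grid.length).reverse.foldl (pvColStep grid j) (mm, 0)).1) m
    = (l.flatMap (fun j => (List.range grid.length).reverse.map (fun i => (i, j)))).foldl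
        (pvStep grid) m := by
  intro l
  induction l with
  | nil => intro m; simp
  | cons j l ih =>
    intro m
    rw [List.foldl_cons, List.flatMap_cons, List.foldl_append, ← ih]
    have hca := col_aux grid j grid.length 0 (by omega) m
    rw [Nat.zero_add, pvGap_top] at hca
    simp only [Nat.cast_zero] at hca
    rw [List.range_eq_range', hca]

lemma pv_flatMap_congr {α β : Type} (l : List α) (f g : α → List β)
    (h : ∀ x ∈ l, f x = g x) : l.flatMap f = l.flatMap g := by
  induction l with
  | nil => rfl
  | cons a l ih =>
    rw [List.flatMap_cons, List.flatMap_cons, h a List.mem_cons_self,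
      ih (fun x hx => h x (List.mem_cons_of_mem a hx))]

lemma pvStep_rcomm (grid : List (List String)) :
    ∀ (s : Int) (p q : Nat × Nat), pvStep grid (pvStep grid s p) q = pvStep grid (pvStep grid s q) p := by
  intro s p q
  rw [pvStep, pvStep, pvStep, pvStep]
  split_ifs <;> first
  | rw [min_right_comm]
  | rfl

lemma pv_nodup_prod (n C : Nat) :
    ((List.range n).flatMap (fun i => (List.range C).map (fun j => (i, j)))).Nodup := by
  rw [List.nodup_flatMap]
  constructor
  · intro i _
    refine List.Nodup.map ?_ List.nodup_range
    intro a b h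
    simpa using congrArg Prod.snd h
  · apply List.Pairwise.imp ?_ (List.pairwise_lt_range)
    intro a b hab
    intro p hp hq
    rw [List.mem_map] at hp hq
    obtain ⟨j1, _, rfl⟩ := hp
    obtain ⟨j2, _, h2⟩ := hq
    have h3 := congrArg Prod.fst h2
    simp at h3
    omega

lemma pv_nodup_col (R C : Nat) :
    ((List.range C).flatMap (fun j => (List.range R).reverse.map (fun i => (i, j)))).Nodup := by
  rw [List.nodup_flatMap]
  constructor
  · intro j _
    refine List.Nodup.map ?_ (List.nodup_reverse.mpr List.nodup_range)
    intro a b h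
    simpa using congrArg Prod.fst h
  · apply List.Pairwise.imp ?_ (List.pairwise_lt_range)
    intro a b hab
    intro p hp hq
    rw [List.mem_map] at hp hq
    obtain ⟨i1, _, rfl⟩ := hp
    obtain ⟨i2, _, h2⟩ := hq
    have h3 := congrArg Prod.snd h2
    simp at h3
    omega

lemma pv_perm_row_col (R C : Nat) :
    ((List.range R).flatMap (fun i => (List.range C).map (fun j => (i, j)))).Perm
    ((List.range C).flatMap (fun j => (List.range R).reverse.map (fun i => (i, j)))) := by
  apply List.perm_of_nodup_nodup_toFinset_eq (pv_nodup_prod R C) (pv_nodup_col R C)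
  ext p
  simp only [List.mem_toFinset, List.mem_flatMap, List.mem_map, List.mem_range, List.mem_reverse]
  constructor
  · rintro ⟨i, hi, j, hj, rfl⟩
    exact ⟨j, hj, i, hi, rfl⟩
  · rintro ⟨j, hj, i, hi, rfl⟩
    exact ⟨i, hi, j, hj, rfl⟩

lemma pvCondB_final (grid : List (List String)) (mm : Int) (r c : Nat) (hr : r < grid.length) :
    pvCondB grid mm grid.length 0 r c
    = (decide (mm ≤ (r : Int)) && ((grid.getD (r - mm.toNat) []).getD c "" == "o")) := by
  unfold pvCondB
  have h1 : (decide (r - mm.toNat < grid.length)) = true := by simp; omega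
  have h2 : (decide (r - mm.toNat = grid.length) && decide (c < 0)) = false := by simp
  rw [h1, h2]
  simp

lemma pv_final (grid : List (List String)) (mm : Int) (ngA : List (List String))
    (hL : ngA.length = grid.length)
    (hRows : ∀ r, (ngA.getD r []).length = (grid.getD r []).length)
    (hVals : ∀ r c, (ngA.getD r []).getD c ""
      = if pvCondB grid mm grid.length 0 r c then "o" else pvBl ((grid.getD r []).getD c "")) :
    ngA = grid.mapIdx (fun i row => row.mapIdx (fun j c =>
      if decide (mm ≤ (i : Int)) && decide (j < (grid.getD (i - mm.toNat) []).length)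
          && ((grid.getD (i - mm.toNat) []).getD j "" == "o") then "o"
      else if c == "o" then "." else c)) := by
  refine List.ext_getElem (by rw [hL, List.length_mapIdx]) ?_
  intro r h1r h2r
  have hrR : r < grid.length := by rw [hL] at h1r; exact h1r
  rw [List.getElem_mapIdx]
  have hrowA : ngA[r] = ngA.getD r [] := (List.getD_eq_getElem _ _ h1r).symm
  have hgr : grid.getD r [] = grid[r] := List.getD_eq_getElem _ _ hrR
  refine List.ext_getElem ?_ ?_
  · rw [hrowA, hRows r, hgr]
    simp
  · intro c hc1 hc2
    have hcl : c < grid[r].length := by simpa using hc2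
    have hcl' : c < (ngA.getD r []).length := by rw [hRows r, hgr]; exact hcl
    have eA : ngA[r][c] = (ngA.getD r []).getD c "" := by
      have h0 : ngA.getD r [] = ngA[r] := List.getD_eq_getElem _ _ h1r
      rw [h0, List.getD_eq_getElem _ _ (h0 ▸ hcl')]
    rw [eA, hVals r c, pvCondB_final grid mm r c hrR]
    rw [List.getElem_mapIdx]
    have hcond : (decide (mm ≤ (r : Int)) && decide (c < (grid.getD (r - mm.toNat) []).length)
          && ((grid.getD (r - mm.toNat) []).getD c "" == "o"))
        = (decide (mm ≤ (r : Int)) && ((grid.getD (r - mm.toNat) []).getD c "" == "o")) := by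
      rcases ho : ((grid.getD (r - mm.toNat) []).getD c "" == "o") with _ | _
      · simp
      · have hlt := pv_o_lt _ c ho
        simp only [List.getD_eq_getElem?_getD] at hlt ho
        simp [hlt, ho]
    rw [hcond]
    have hrc : grid[r].getD c "" = grid[r][c] := List.getD_eq_getElem _ _ hcl
    rw [pvBl, hgr, hrc]

lemma pv_noo_cell (grid : List (List String))
    (hno : ∀ row ∈ grid, ∀ c ∈ row, ¬ c = "o") (i j : Nat) :
    ((grid.getD i []).getD j "" == "o") = false := by
  rcases lt_or_ge i grid.length with hi | hi
  · rw [List.getD_eq_getElem _ _ hi]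
    rcases lt_or_ge j grid[i].length with hj | hj
    · rw [List.getD_eq_getElem _ _ hj]
      exact beq_eq_false_iff_ne.mpr (hno _ (List.getElem_mem hi) _ (List.getElem_mem hj))
    · rw [List.getD_eq_getElem?_getD, List.getElem?_eq_none hj]
      rfl
  · have h0 : grid.getD i [] = [] := by
      rw [List.getD_eq_getElem?_getD, List.getElem?_eq_none hi]
      rfl
    rw [h0]
    rfl

lemma pv_foldl_pvStep_noo (grid : List (List String))
    (hno : ∀ row ∈ grid, ∀ c ∈ row, ¬ c = "o") :
    ∀ (l : List (Nat × Nat)) (b : Int), l.foldl (pvStep grid) b = b := by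
  intro l
  induction l with
  | nil => intro b; rfl
  | cons p l ih =>
    intro b
    have h' := pv_noo_cell grid hno p.1 p.2
    simp only [List.getD_eq_getElem?_getD] at h'
    rw [List.foldl_cons, pvStep, if_neg (by simp [h']), ih]

lemma pv_blank_noo (grid : List (List String))
    (hno : ∀ row ∈ grid, ∀ c ∈ row, ¬ c = "o") :
    grid.map (List.map pvBl) = grid := by
  conv_rhs => rw [← List.map_id grid]
  refine List.map_congr_left ?_
  intro row hrow
  have : List.map pvBl row = List.map id row := by
    refine List.map_congr_left ?_
    intro c hc
    exact pvBl_ne_o c (beq_eq_false_iff_ne.mpr (hno row hrow c hc))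
  rw [this, List.map_id, id]

lemma pass2_noo_inner (grid : List (List String))
    (hno : ∀ row ∈ grid, ∀ c ∈ row, ¬ c = "o") (mm : Int) (i : Nat) :
    ∀ (l : List Nat) (ng : List (List String)),
    l.foldl (fun ng j =>
      if (grid.getD i []).getD j "" == "o" then pvSetCell ng (i + mm.toNat) j "o" else ng) ng
    = ng := by
  intro l
  induction l with
  | nil => intro ng; rfl
  | cons j l ih =>
    intro ng
    have h' := pv_noo_cell grid hno i j
    simp only [List.getD_eq_getElem?_getD] at h'
    rw [List.foldl_cons, if_neg (by simp [h']), ih]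

lemma pass2_noo (grid : List (List String))
    (hno : ∀ row ∈ grid, ∀ c ∈ row, ¬ c = "o") (mm : Int) :
    ∀ (l : List Nat) (ng : List (List String)),
    l.foldl (fun ng i =>
      (List.range ((grid.getD i []).length)).foldl (fun ng j =>
        if (grid.getD i []).getD j "" == "o" then pvSetCell ng (i + mm.toNat) j "o" else ng) ng) ng
    = ng := by
  intro l
  induction l with
  | nil => intro ng; rfl
  | cons i l ih =>
    intro ng
    rw [List.foldl_cons, pass2_noo_inner grid hno mm i, ih]

lemma pv_mapIdx_noo (grid : List (List String))
    (hno : ∀ row ∈ grid, ∀ c ∈ row, ¬ c = "o") (mm : Int) :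
    grid.mapIdx (fun i row => row.mapIdx (fun j c =>
      if decide (mm ≤ (i : Int)) && decide (j < (grid.getD (i - mm.toNat) []).length)
          && ((grid.getD (i - mm.toNat) []).getD j "" == "o") then "o"
      else if c == "o" then "." else c)) = grid := by
  refine List.ext_getElem (by simp) ?_
  intro r h1r h2r
  rw [List.getElem_mapIdx]
  refine List.ext_getElem (by simp) ?_
  intro c hc1 hc2
  rw [List.getElem_mapIdx]
  have h3 := pv_noo_cell grid hno (r - mm.toNat) c
  simp only [List.getD_eq_getElem?_getD] at h3
  rw [if_neg (by simp [h3])]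
  rw [if_neg (by simp [beq_eq_false_iff_ne.mpr
    (hno _ (List.getElem_mem h2r) _ (List.getElem_mem (by simpa using hc2)))])]

lemma pv_main (grid : List (List String)) (hpre : Pre_move_down_max grid) :
    move_down_max grid = move_down_max_alt grid := by
  rcases hpre with hrect | hno
  · -- rectangular grid
    have hC : ∀ r < grid.length, (grid.getD r []).length = (grid.headD []).length := by
      intro r hr
      rw [List.getD_eq_getElem _ _ hr]
      exact hrect _ (List.getElem_mem hr)
    have h1 := pass1_outer grid grid.length (le_refl _)
    have hrm : pvRowMajor grid grid.length
        = (List.range grid.length).flatMap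
            (fun i => (List.range ((grid.headD []).length)).map (fun j => (i, j))) := by
      rw [pvRowMajor]
      apply pv_flatMap_congr
      intro i hi
      rw [hC i (List.mem_range.mp hi)]
    have hmmB : (List.range ((grid.headD []).length)).foldl
          (fun mm j => ((List.range grid.length).reverse.foldl (pvColStep grid j) (mm, 0)).1) 1000
        = (pvRowMajor grid grid.length).foldl (pvStep grid) 1000 := by
      rw [cols_fold grid _ 1000, hrm]
      exact @List.Perm.foldl_eq _ _ (pvStep grid) _ _ ⟨pvStep_rcomm grid⟩
        (pv_perm_row_col grid.length ((grid.headD []).length)).symm 1000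
    set mmA := (pvRowMajor grid grid.length).foldl (pvStep grid) 1000 with hmmA
    have hmm0 : 0 ≤ mmA := by
      rw [hmmA]
      exact foldl_pvStep_nonneg grid _ 1000 (by norm_num)
        (fun p hp => ((pvRowMajor_mem grid _ (le_refl _)) p hp).1)
    have hble : ∀ p : Nat × Nat, p.1 < grid.length →
        ((grid.getD p.1 []).getD p.2 "" == "o") = true → mmA ≤ pvDrop grid p.1 p.2 := by
      intro p hp ho
      rw [hmmA]
      refine foldl_pvStep_le_mem grid _ 1000 p ?_ ho
      rw [pvRowMajor, List.mem_flatMap]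
      exact ⟨p.1, List.mem_range.mpr hp,
        List.mem_map.mpr ⟨p.2, List.mem_range.mpr (pv_o_lt _ _ ho), rfl⟩⟩
    have h2 := pass2_outer grid mmA hmm0 hble hC grid.length (le_refl _)
    obtain ⟨hL, hRows, hVals⟩ := h2
    simp only [move_down_max, move_down_max_alt]
    rw [h1]
    simp only [pvBlankTo_full]
    rw [hmmB]
    simp only [Prod.mk.injEq]
    refine ⟨?_, trivial⟩
    exact pv_final grid mmA _ hL hRows hVals
  · -- no "o" anywhere
    simp only [move_down_max, move_down_max_alt]
    rw [pass1_outer grid grid.length (le_refl _), pv_foldl_pvStep_noo grid hno]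
    simp only [pvBlankTo_full]
    rw [cols_fold grid _ 1000, pv_foldl_pvStep_noo grid hno]
    rw [pv_blank_noo grid hno]
    rw [pass2_noo grid hno 1000 (List.range grid.length) grid]
    rw [pv_mapIdx_noo grid hno 1000]

-- ===== VERDICT (by name: the statement is the Claim_ definition above) =====
theorem move_down_max_spec : Claim_equal_move_down_max := by
  intro grid _ hpre
  unfold Spec_move_down_max
  exact pv_main grid hpre
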